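-- pv_equiv track=rewrite | github.com/halilkosee/AlgorithmDesign | 3/algorithms for fun_3/part1.py | work
-- ===== SOURCE A (Python) =====
-- def takefirst(elem):#to use for sort function
--     return elem[1]#while sorting elements in list we should take second element from each list
--
-- def work(L):
--     L.sort(key=takefirst)#sorting list for belong to their priorities
--     L.reverse()#after sorting we should reverse to find dicreasing list
--    #priority list
--
--     temp=0
--     total=0
--     for i in range(len(L)):#while in list
--         total=((L[i][0]+temp)*L[i][1])+total
--         temp+=L[i][0]
--
--     return total
-- ===== SOURCE B (Python) =====
-- def work(L):
--     L.sort(key=lambda e: e[1])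
--     L.reverse()
--     P = []
--     s = 0
--     for e in L:
--         s += e[0]
--         P.append(s)
--     total = 0
--     for p, e in zip(P, L):
--         total += p * e[1]
--     return total
-- ===== Notes on version B (the rewrite author's own statement) =====
-- stated objective: alternative
-- what changed: A's single fused loop carrying a running 'temp' is split into two passes: one pass builds an explicit prefix-sum list P of the first components, then a second pass accumulates sum of P[i]*L[i][1] over zip(P, L); the sort-then-reverse mutation of L is kept identical.
import Mathlib
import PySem

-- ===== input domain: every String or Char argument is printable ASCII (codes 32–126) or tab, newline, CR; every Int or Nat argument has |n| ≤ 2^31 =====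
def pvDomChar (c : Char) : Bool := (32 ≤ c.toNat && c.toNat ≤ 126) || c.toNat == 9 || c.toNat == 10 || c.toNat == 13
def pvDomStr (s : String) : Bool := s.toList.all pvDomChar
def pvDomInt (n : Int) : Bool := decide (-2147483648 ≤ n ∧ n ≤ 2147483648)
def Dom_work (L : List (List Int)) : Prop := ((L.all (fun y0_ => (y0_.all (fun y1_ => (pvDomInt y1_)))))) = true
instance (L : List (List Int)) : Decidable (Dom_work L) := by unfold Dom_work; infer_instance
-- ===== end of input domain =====

-- ===== PORT A =====
-- B (work_alt) splits A's fused loop into a prefix-sum pass plus a weighted-sum pass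
-- (same sort-then-reverse; both Pythons mutate L in place, the claim is about the return value).
def work (L : List (List Int)) : Int :=
  let M := (PySem.List.sorted L (fun e => PySem.List.pyGetD e 1 0)).reverse
  ((PySem.List.pyRange 0 (PySem.List.len M) 1).foldl
    (fun (st : Int × Int) i =>
      let e := PySem.List.pyGetD M i []
      (st.1 + PySem.List.pyGetD e 0 0,
       (PySem.List.pyGetD e 0 0 + st.1) * PySem.List.pyGetD e 1 0 + st.2))
    (0, 0)).2

-- ===== PORT B =====
def work_alt (L : List (List Int)) : Int :=
  let M := (PySem.List.sorted L (fun e => PySem.List.pyGetD e 1 0)).reverse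
  let P := (M.foldl
    (fun (st : List Int × Int) e =>
      let s := st.2 + PySem.List.pyGetD e 0 0
      (st.1 ++ [s], s)) ([], 0)).1
  (P.zip M).foldl (fun total pe => total + pe.1 * PySem.List.pyGetD pe.2 1 0) 0

-- ===== PRECONDITION & SPEC =====
-- Pre_ excludes exactly the inputs on which A raises IndexError: an inner list
-- with fewer than two elements (the sort key takes elem[1], the loop reads [0] and [1]).
def Pre_work (L : List (List Int)) : Prop := ∀ e ∈ L, 2 ≤ e.length
instance (L : List (List Int)) : Decidable (Pre_work L) := by unfold Pre_work; infer_instance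
def pvWitness_work : List (List Int) := [[1, 2], [3, 1], [2, 2]]
def Spec_work (L : List (List Int)) (out : Int) : Prop := out = work_alt L
instance (L : List (List Int)) (out : Int) : Decidable (Spec_work L out) := by unfold Spec_work; infer_instance

-- ===== CLAIM (what is proved, stated in full; the proofs are below) =====
def Claim_equal_work : Prop := ∀ (L : List (List Int)), Dom_work L → Pre_work L → Spec_work L (work L)

-- ===== LEMMAS AND PROOFS =====

/-- the prefix sums of the first components, starting from `s` -/
def prefList : List (List Int) → Int → List Int
  | [], _ => []
  | e :: es, s => (s + PySem.List.pyGetD e 0 0) :: prefList es (s + PySem.List.pyGetD e 0 0)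

theorem foldB_eq_prefList (M : List (List Int)) (acc : List Int) (s : Int) :
    (M.foldl
      (fun (st : List Int × Int) e =>
        let t := st.2 + PySem.List.pyGetD e 0 0
        (st.1 ++ [t], t)) (acc, s)).1 = acc ++ prefList M s := by
  induction M generalizing acc s with
  | nil => simp [prefList]
  | cons e es ih => simp [List.foldl, prefList, ih]

theorem zip_foldl_eq_fused (M : List (List Int)) (s t : Int) :
    ((prefList M s).zip M).foldl
        (fun total pe => total + pe.1 * PySem.List.pyGetD pe.2 1 0) t
      = (M.foldl
          (fun (st : Int × Int) e =>
            (st.1 + PySem.List.pyGetD e 0 0,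
             (PySem.List.pyGetD e 0 0 + st.1) * PySem.List.pyGetD e 1 0 + st.2))
          (s, t)).2 := by
  induction M generalizing s t with
  | nil => simp [prefList]
  | cons e es ih =>
      simp only [prefList, List.zip_cons_cons, List.foldl]
      rw [ih]
      ring_nf

-- ===== VERDICT (by name: the statement is the Claim_ definition above) =====
theorem work_spec : Claim_equal_work := by
  intro L _ _
  unfold Spec_work
  simp only [work, work_alt]
  rw [PySem.List.foldl_pyRange_zero_pyGetD
        ((PySem.List.sorted L (fun e => PySem.List.pyGetD e 1 0)).reverse) []
        (fun (st : Int × Int) e =>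
          (st.1 + PySem.List.pyGetD e 0 0,
           (PySem.List.pyGetD e 0 0 + st.1) * PySem.List.pyGetD e 1 0 + st.2))
        (0, 0)]
  rw [foldB_eq_prefList, List.nil_append, zip_foldl_eq_fused]
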